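-- pv_equiv track=rewrite | github.com/diyakasbekar/elara | precompute_features.py | map_gender_group
-- ===== SOURCE A (Python) =====
-- def map_gender_group(section_name):
--     section = str(section_name).lower()
--     female_keywords = ['womens', 'ladies', 'divided']
--     male_keywords = ['mens', 'men', 'divided']
--     if any(kw in section for kw in female_keywords):
--         return "female"
--     elif any(kw in section for kw in male_keywords):
--         return "male"
--     return None
-- ===== SOURCE B (Python) =====
-- FEMALE_STARTS = ("womens", "ladies", "divided")
-- MALE_STARTS = ("mens", "men")
--
--
-- def map_gender_group(section_name):
--     # Single left-to-right pass over all start positions, accumulating which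
--     # gender's keyword was seen; decide at the end (female has priority).
--     section = str(section_name).lower()
--     saw_female = saw_male = False
--     for i in range(len(section) + 1):
--         if section.startswith(FEMALE_STARTS, i):
--             saw_female = True
--         if section.startswith(MALE_STARTS, i):
--             saw_male = True
--     if saw_female:
--         return "female"
--     if saw_male:
--         return "male"
--     return None
-- ===== Notes on version B (the rewrite author's own statement) =====
-- stated objective: alternative
-- what changed: Instead of one substring-containment test per keyword across two any() branches, B makes a single pass over every start position of the lowercased string, accumulating saw_female/saw_male flags with startswith checks at each offset, and decides at the end (female priority; the unreachable male 'divided' entry is dropped since any 'divided' hit is already female).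
import Mathlib
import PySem

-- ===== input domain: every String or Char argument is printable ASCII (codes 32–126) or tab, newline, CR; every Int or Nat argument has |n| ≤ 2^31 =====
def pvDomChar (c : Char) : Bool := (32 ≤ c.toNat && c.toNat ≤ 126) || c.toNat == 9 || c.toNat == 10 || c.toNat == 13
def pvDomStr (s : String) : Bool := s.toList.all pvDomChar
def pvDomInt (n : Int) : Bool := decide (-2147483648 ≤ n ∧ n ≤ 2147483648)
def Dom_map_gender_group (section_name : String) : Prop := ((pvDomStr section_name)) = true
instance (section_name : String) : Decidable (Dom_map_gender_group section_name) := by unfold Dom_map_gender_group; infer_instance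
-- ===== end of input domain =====

-- B replaces A's per-keyword substring tests by one pass over start positions with saw_female/saw_male flags (alternative decomposition).

-- ===== PORT A =====
def map_gender_group (section_name : String) : Option String :=
  let sec := PySem.Str.lower section_name
  let female_keywords : List String := ["womens", "ladies", "divided"]
  let male_keywords : List String := ["mens", "men", "divided"]
  if female_keywords.any (fun kw => PySem.Str.isIn kw sec) then
    some "female"
  else if male_keywords.any (fun kw => PySem.Str.isIn kw sec) then
    some "male"
  else
    none

-- ===== PORT B =====
-- tail.startswith(FEMALE_STARTS) at the current position (on code points, exact)
def pvStartsFemale (tail : List Char) : Bool :=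
  PySem.Chars.startswith tail "womens".toList ||
  PySem.Chars.startswith tail "ladies".toList ||
  PySem.Chars.startswith tail "divided".toList

def pvStartsMale (tail : List Char) : Bool :=
  PySem.Chars.startswith tail "mens".toList ||
  PySem.Chars.startswith tail "men".toList

-- the loop over i = 0 .. len(section): each step looks at section[i:], updates the flags
def pvScanB (tail : List Char) (sawFemale sawMale : Bool) : Bool × Bool :=
  let f := sawFemale || pvStartsFemale tail
  let m := sawMale || pvStartsMale tail
  match tail with
  | [] => (f, m)
  | _ :: rest => pvScanB rest f m

def map_gender_group_alt (section_name : String) : Option String :=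
  let sec := (PySem.Str.lower section_name).toList
  match pvScanB sec false false with
  | (sawFemale, sawMale) =>
    if sawFemale then some "female"
    else if sawMale then some "male"
    else none

-- ===== PRECONDITION & SPEC =====
def Spec_map_gender_group (section_name : String) (out : Option String) : Prop := out = map_gender_group_alt section_name
instance (section_name : String) (out : Option String) : Decidable (Spec_map_gender_group section_name out) := by unfold Spec_map_gender_group; infer_instance

-- ===== CLAIM =====
def Claim_equal_map_gender_group : Prop := ∀ (section_name : String), Dom_map_gender_group section_name → Spec_map_gender_group section_name (map_gender_group section_name)

-- ===== LEMMAS AND PROOFS =====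

-- the scan's flags are true iff they start true or some suffix matches
theorem pvScanB_true_iff (l : List Char) (f m : Bool) :
    ((pvScanB l f m).1 = true ↔ f = true ∨ ∃ j, pvStartsFemale (l.drop j) = true) ∧
    ((pvScanB l f m).2 = true ↔ m = true ∨ ∃ j, pvStartsMale (l.drop j) = true) := by
  induction l generalizing f m with
  | nil =>
    simp only [pvScanB]
    constructor
    · simp only [Bool.or_eq_true]
      constructor
      · rintro (h | h)
        · exact Or.inl h
        · exact Or.inr ⟨0, h⟩
      · rintro (h | ⟨j, hj⟩)
        · exact Or.inl h
        · simp only [List.drop_nil] at hj; exact Or.inr hj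
    · simp only [Bool.or_eq_true]
      constructor
      · rintro (h | h)
        · exact Or.inl h
        · exact Or.inr ⟨0, h⟩
      · rintro (h | ⟨j, hj⟩)
        · exact Or.inl h
        · simp only [List.drop_nil] at hj; exact Or.inr hj
  | cons a rest ih =>
    simp only [pvScanB]
    have h := ih (f || pvStartsFemale (a :: rest)) (m || pvStartsMale (a :: rest))
    constructor
    · rw [h.1]
      simp only [Bool.or_eq_true]
      constructor
      · rintro ((h1 | h1) | ⟨j, hj⟩)
        · exact Or.inl h1
        · exact Or.inr ⟨0, h1⟩
        · exact Or.inr ⟨j + 1, hj⟩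
      · rintro (h1 | ⟨j, hj⟩)
        · exact Or.inl (Or.inl h1)
        · cases j with
          | zero => exact Or.inl (Or.inr hj)
          | succ k => exact Or.inr ⟨k, hj⟩
    · rw [h.2]
      simp only [Bool.or_eq_true]
      constructor
      · rintro ((h1 | h1) | ⟨j, hj⟩)
        · exact Or.inl h1
        · exact Or.inr ⟨0, h1⟩
        · exact Or.inr ⟨j + 1, hj⟩
      · rintro (h1 | ⟨j, hj⟩)
        · exact Or.inl (Or.inl h1)
        · cases j with
          | zero => exact Or.inl (Or.inr hj)
          | succ k => exact Or.inr ⟨k, hj⟩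

theorem pvScan_fst_eq (l : List Char) :
    (pvScanB l false false).1 =
      (PySem.Chars.isIn "womens".toList l || PySem.Chars.isIn "ladies".toList l ||
       PySem.Chars.isIn "divided".toList l) := by
  rw [Bool.eq_iff_iff, (pvScanB_true_iff l false false).1]
  simp only [Bool.or_eq_true, pvStartsFemale, PySem.Chars.startswith_iff,
    ← PySem.Chars.exists_prefix_drop_iff_isIn]
  constructor
  · rintro (h | ⟨j, (h | h) | h⟩)
    · exact absurd h (by simp)
    · exact Or.inl (Or.inl ⟨j, h⟩)
    · exact Or.inl (Or.inr ⟨j, h⟩)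
    · exact Or.inr ⟨j, h⟩
  · rintro ((⟨j, h⟩ | ⟨j, h⟩) | ⟨j, h⟩)
    · exact Or.inr ⟨j, Or.inl (Or.inl h)⟩
    · exact Or.inr ⟨j, Or.inl (Or.inr h)⟩
    · exact Or.inr ⟨j, Or.inr h⟩

theorem pvScan_snd_eq (l : List Char) :
    (pvScanB l false false).2 =
      (PySem.Chars.isIn "mens".toList l || PySem.Chars.isIn "men".toList l) := by
  rw [Bool.eq_iff_iff, (pvScanB_true_iff l false false).2]
  simp only [Bool.or_eq_true, pvStartsMale, PySem.Chars.startswith_iff,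
    ← PySem.Chars.exists_prefix_drop_iff_isIn]
  constructor
  · rintro (h | ⟨j, h | h⟩)
    · exact absurd h (by simp)
    · exact Or.inl ⟨j, h⟩
    · exact Or.inr ⟨j, h⟩
  · rintro (⟨j, h⟩ | ⟨j, h⟩)
    · exact Or.inr ⟨j, Or.inl h⟩
    · exact Or.inr ⟨j, Or.inr h⟩

-- Str.isIn on the lowered string = Chars.isIn on its char list
theorem pvStrIsIn_eq (kw s : String) :
    PySem.Str.isIn kw s = PySem.Chars.isIn kw.toList s.toList := by
  rw [Bool.eq_iff_iff, PySem.Str.isIn_iff_infix, PySem.Chars.isIn_iff_infix]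

-- ===== VERDICT =====
theorem map_gender_group_spec : Claim_equal_map_gender_group := by
  intro s _
  unfold Spec_map_gender_group map_gender_group map_gender_group_alt
  simp only [List.any_cons, List.any_nil, Bool.or_false]
  set sec := PySem.Str.lower s with hsec
  rcases hp : pvScanB sec.toList false false with ⟨f, m⟩
  have hf : f = (PySem.Chars.isIn "womens".toList sec.toList ||
      PySem.Chars.isIn "ladies".toList sec.toList ||
      PySem.Chars.isIn "divided".toList sec.toList) := by
    have := pvScan_fst_eq sec.toList; rw [hp] at this; exact this
  have hm : m = (PySem.Chars.isIn "mens".toList sec.toList ||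
      PySem.Chars.isIn "men".toList sec.toList) := by
    have := pvScan_snd_eq sec.toList; rw [hp] at this; exact this
  simp only [pvStrIsIn_eq]
  cases h1 : PySem.Chars.isIn "womens".toList sec.toList <;>
  cases h2 : PySem.Chars.isIn "ladies".toList sec.toList <;>
  cases h3 : PySem.Chars.isIn "divided".toList sec.toList <;>
  cases h4 : PySem.Chars.isIn "mens".toList sec.toList <;>
  cases h5 : PySem.Chars.isIn "men".toList sec.toList <;>
  simp_all
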